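-- pv_equiv track=rewrite | github.com/ADIITJ/VideoMind | scripts/gradio_app.py | find_best_object
-- ===== SOURCE A (Python) =====
-- def find_best_object(query, obj_summ):
--     """Find the best matching object in the query using substring matching."""
--     best_obj, best_len = None, 0
--     q_lower = query.lower()
--     for obj in obj_summ.keys():
--         candidate = obj.lower()
--         if candidate in q_lower and len(candidate) > best_len:
--             best_obj, best_len = obj, len(candidate)
--     return best_obj
-- ===== SOURCE B (Python) =====
-- def find_best_object(query, obj_summ):
--     """Sort keys by descending lowercased length; return the first whose lowercase is a substring of the lowered query."""
--     q_lower = query.lower()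
--     for obj in sorted(obj_summ, key=lambda o: len(o.lower()), reverse=True):
--         if obj and obj.lower() in q_lower:
--             return obj
--     return None
-- ===== Notes on version B (the rewrite author's own statement) =====
-- stated objective: alternative
-- what changed: Replaces A's single-pass running-best loop with a staged sort-then-scan: sort the keys by descending lowercased length (Python's stable sort preserves dict order among equal lengths) and return the first sorted key whose lowercase is a substring of the lowered query, which reproduces A's longest-match/first-encountered tie-break.
import Mathlib
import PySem

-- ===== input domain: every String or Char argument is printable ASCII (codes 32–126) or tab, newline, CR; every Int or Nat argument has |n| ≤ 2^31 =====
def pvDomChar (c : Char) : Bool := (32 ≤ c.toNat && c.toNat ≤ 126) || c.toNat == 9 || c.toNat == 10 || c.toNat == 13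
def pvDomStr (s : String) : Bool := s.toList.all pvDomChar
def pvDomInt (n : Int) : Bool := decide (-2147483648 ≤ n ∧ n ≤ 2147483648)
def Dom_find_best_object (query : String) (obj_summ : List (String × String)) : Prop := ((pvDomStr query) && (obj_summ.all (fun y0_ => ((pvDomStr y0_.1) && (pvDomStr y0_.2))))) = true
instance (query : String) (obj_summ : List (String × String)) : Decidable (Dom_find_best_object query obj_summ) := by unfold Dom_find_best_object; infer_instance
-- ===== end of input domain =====

-- B replaces A's running-best loop by sort-by-descending-lowercased-length then first-match scan (stable sort keeps A's tie-break); return values only, no mutation involved.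

-- ===== PORT A =====
def find_best_object (query : String) (obj_summ : List (String × String)) : Option String :=
  let q_lower := PySem.Str.lower query
  (obj_summ.foldl
    (fun st p =>
      let candidate := PySem.Str.lower p.1
      if PySem.Str.isIn candidate q_lower && decide (PySem.Str.len candidate > st.2)
      then (some p.1, PySem.Str.len candidate)
      else st)
    ((none : Option String), (0 : Int))).1

-- ===== PORT B =====
-- B's loop: first key in the given order that is nonempty and whose lowercase is a substring
def pvScan (q : String) : List String → Option String
  | [] => none
  | o :: t =>
    if !o.toList.isEmpty && PySem.Str.isIn (PySem.Str.lower o) q then some o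
    else pvScan q t

def find_best_object_alt (query : String) (obj_summ : List (String × String)) : Option String :=
  let q_lower := PySem.Str.lower query
  pvScan q_lower
    (PySem.List.sorted (obj_summ.map Prod.fst) (fun o => PySem.Str.len (PySem.Str.lower o)) true)

-- ===== PRECONDITION & SPEC =====
def Spec_find_best_object (query : String) (obj_summ : List (String × String)) (out : Option String) : Prop := out = find_best_object_alt query obj_summ
instance (query : String) (obj_summ : List (String × String)) (out : Option String) : Decidable (Spec_find_best_object query obj_summ out) := by unfold Spec_find_best_object; infer_instance

-- ===== CLAIM (what is proved, stated in full; the proofs are below) =====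
def Claim_equal_find_best_object : Prop := ∀ (query : String) (obj_summ : List (String × String)), Dom_find_best_object query obj_summ → Spec_find_best_object query obj_summ (find_best_object query obj_summ)

-- ===== LEMMAS AND PROOFS =====

-- pvScan is List.find?
theorem pvScan_eq_find? (q : String) (l : List String) :
    pvScan q l = l.find? (fun o => !o.toList.isEmpty && PySem.Str.isIn (PySem.Str.lower o) q) := by
  induction l with
  | nil => rfl
  | cons o t ih =>
    by_cases h : (!o.toList.isEmpty && PySem.Str.isIn (PySem.Str.lower o) q) = true
    · rw [List.find?_cons_of_pos (p := fun o => !o.toList.isEmpty && PySem.Str.isIn (PySem.Str.lower o) q) h]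
      show (if !o.toList.isEmpty && PySem.Str.isIn (PySem.Str.lower o) q then some o else pvScan q t) = some o
      rw [if_pos h]
    · rw [List.find?_cons_of_neg (p := fun o => !o.toList.isEmpty && PySem.Str.isIn (PySem.Str.lower o) q) h]
      show (if !o.toList.isEmpty && PySem.Str.isIn (PySem.Str.lower o) q then some o else pvScan q t) = _
      rw [if_neg h, ih]

-- the best_len A stores for a current best value (generic in the length function)
def pvBestLen {α : Type} (key : α → Int) (b : Option α) : Int :=
  match b with
  | none => 0
  | some m => key m

theorem pvBestLen_nonneg {α : Type} (key : α → Int) (hnn : ∀ x, 0 ≤ key x) (b : Option α) :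
    0 ≤ pvBestLen key b := by
  cases b with
  | none => simp [pvBestLen]
  | some m => simpa [pvBestLen] using hnn m

-- A's running-best loop computes the first-maximum fold (= PySem.List.max?) of the filtered list;
-- p0 is the "nonempty" test, equivalent to a strictly positive key
theorem pv_loop_eq {α : Type} (qt p0 : α → Bool) (key : α → Int)
    (hkey : ∀ x, 0 < key x ↔ p0 x = true) (hnn : ∀ x, 0 ≤ key x) (xs : List α) :
    ∀ b : Option α,
    (xs.foldl (fun st o => if qt o && decide (key o > st.2) then (some o, key o) else st)
      (b, pvBestLen key b)).1
    = (xs.filter (fun o => p0 o && qt o)).foldl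
        (fun acc x => match acc with
          | none => some x
          | some m => if key m < key x then some x else some m) b := by
  induction xs with
  | nil => intro b; simp
  | cons o t ih =>
    intro b
    by_cases hq : qt o = true
    · by_cases hp : p0 o = true
      · have hko : 0 < key o := (hkey o).mpr hp
        cases b with
        | none =>
          simpa [List.foldl_cons, List.filter_cons, hq, hp, hko, pvBestLen] using ih (some o)
        | some m =>
          by_cases hcmp : key m < key o
          · simpa [List.foldl_cons, List.filter_cons, hq, hp, hcmp, pvBestLen] using ih (some o)
          · simpa [List.foldl_cons, List.filter_cons, hq, hp, hcmp, pvBestLen] using ih (some m)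
      · have hk0 : ¬ 0 < key o := fun h => hp ((hkey o).mp h)
        have hb := pvBestLen_nonneg key hnn b
        have hgt : ¬ (pvBestLen key b < key o) := by omega
        simpa [List.foldl_cons, List.filter_cons, hq, hp, hgt] using ih b
    · simp only [Bool.not_eq_true] at hq
      simpa [List.foldl_cons, List.filter_cons, hq] using ih b

-- find? skips an inserted non-matching element
theorem pv_find_insertBy_neg {α : Type} (before : α → α → Bool) (p : α → Bool) (x : α)
    (hx : p x = false) : ∀ S : List α,
    (PySem.List.insertBy before x S).find? p = S.find? p := by
  intro S
  induction S with
  | nil =>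
    show List.find? p [x] = _
    simp [List.find?, hx]
  | cons y ys ih =>
    show (if before x y then x :: y :: ys else y :: PySem.List.insertBy before x ys).find? p = _
    by_cases hb : before x y = true
    · rw [if_pos hb, List.find?_cons_of_neg (by simp [hx])]
    · rw [if_neg hb]
      by_cases hy : p y = true
      · rw [List.find?_cons_of_pos hy, List.find?_cons_of_pos hy]
      · rw [List.find?_cons_of_neg hy, List.find?_cons_of_neg hy, ih]

-- find? of inserting a matching element into a descending list
theorem pv_find_insertBy_pos {α κ : Type} [LinearOrder κ] (key : α → κ) (p : α → Bool) (x : α)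
    (hx : p x = true) : ∀ S : List α, S.Pairwise (fun a b => key b ≤ key a) →
    (PySem.List.insertBy (fun a b => decide (key b < key a)) x S).find? p
    = match S.find? p with
      | none => some x
      | some m => if key m < key x then some x else some m := by
  intro S
  induction S with
  | nil =>
    intro _
    show List.find? p [x] = _
    simp [List.find?, hx]
  | cons y ys ih =>
    intro hpw
    have hyge : ∀ z ∈ ys, key z ≤ key y := fun z hz => List.rel_of_pairwise_cons hpw hz
    show (if decide (key y < key x) then x :: y :: ys
          else y :: PySem.List.insertBy (fun a b => decide (key b < key a)) x ys).find? p = _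
    by_cases hb : key y < key x
    · rw [if_pos (by simpa using hb), List.find?_cons_of_pos hx]
      cases hfind : (y :: ys).find? p with
      | none => rfl
      | some m =>
        have hm : m ∈ y :: ys := List.mem_of_find?_eq_some hfind
        have hmlt : key m < key x := by
          rcases List.mem_cons.mp hm with h | h
          · rw [h]; exact hb
          · exact lt_of_le_of_lt (hyge m h) hb
        simp [hmlt]
    · rw [if_neg (by simpa using hb)]
      have hxle : key x ≤ key y := le_of_not_gt hb
      by_cases hy : p y = true
      · rw [List.find?_cons_of_pos hy, List.find?_cons_of_pos hy]
        have : ¬ key y < key x := not_lt.mpr hxle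
        simp [this]
      · rw [List.find?_cons_of_neg hy, List.find?_cons_of_neg hy]
        exact ih hpw.tail

-- first match of the descending stable sort = first maximum of the filtered list
theorem pv_find_sorted_rev {α κ : Type} [LinearOrder κ] (key : α → κ) (p : α → Bool)
    (xs : List α) :
    (PySem.List.sorted xs key true).find? p = PySem.List.max? (xs.filter p) key := by
  induction xs using List.reverseRecOn with
  | nil => rfl
  | append_singleton xs x ih =>
    have hsort : PySem.List.sorted (xs ++ [x]) key true
        = PySem.List.insertBy (fun a b => decide (key b < key a)) x (PySem.List.sorted xs key true) := by
      rw [PySem.List.sorted_rev_eq_foldl_insertBy, PySem.List.sorted_rev_eq_foldl_insertBy,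
        List.foldl_append]
      rfl
    have hpw := PySem.List.sorted_pairwise_rev xs key
    by_cases hx : p x = true
    · rw [hsort, pv_find_insertBy_pos key p x hx _ hpw, ih]
      rw [show (xs ++ [x]).filter p = xs.filter p ++ [x] by simp [List.filter_append, hx]]
      unfold PySem.List.max?
      rw [List.foldl_append]
      rfl
    · simp only [Bool.not_eq_true] at hx
      rw [hsort, pv_find_insertBy_neg _ p x hx, ih]
      rw [show (xs ++ [x]).filter p = xs.filter p by simp [List.filter_append, hx]]

-- folding over the pairs using only first components is folding over the mapped keys
theorem pv_fold_fst (q : String) (l : List (String × String)) :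
    ∀ init : Option String × Int,
    l.foldl
      (fun st p =>
        if PySem.Str.isIn (PySem.Str.lower p.1) q && decide (PySem.Str.len (PySem.Str.lower p.1) > st.2)
        then (some p.1, PySem.Str.len (PySem.Str.lower p.1))
        else st) init
    = (l.map Prod.fst).foldl
      (fun st obj =>
        if PySem.Str.isIn (PySem.Str.lower obj) q && decide (PySem.Str.len (PySem.Str.lower obj) > st.2)
        then (some obj, PySem.Str.len (PySem.Str.lower obj))
        else st) init := by
  induction l with
  | nil => intro _; rfl
  | cons x t ih =>
    intro init
    simp only [List.foldl_cons, List.map_cons]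
    exact ih _

-- the two ports agree
theorem pv_main (q : String) (l : List (String × String)) :
    (l.foldl
      (fun st p =>
        if PySem.Str.isIn (PySem.Str.lower p.1) q && decide (PySem.Str.len (PySem.Str.lower p.1) > st.2)
        then (some p.1, PySem.Str.len (PySem.Str.lower p.1))
        else st)
      ((none : Option String), (0 : Int))).1
    = pvScan q (PySem.List.sorted (l.map Prod.fst) (fun o => PySem.Str.len (PySem.Str.lower o)) true) := by
  have hlen : ∀ o : String, PySem.Str.len (PySem.Str.lower o) = (o.toList.length : Int) := by
    intro o
    simp [PySem.Str.len, PySem.Str.toList_lower, PySem.Chars.lower]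
  rw [pv_fold_fst q l ((none : Option String), (0 : Int)),
    pvScan_eq_find?,
    pv_find_sorted_rev (fun o => PySem.Str.len (PySem.Str.lower o))
      (fun o => !o.toList.isEmpty && PySem.Str.isIn (PySem.Str.lower o) q) (l.map Prod.fst)]
  exact pv_loop_eq (fun o => PySem.Str.isIn (PySem.Str.lower o) q)
    (fun o => !o.toList.isEmpty) (fun o => PySem.Str.len (PySem.Str.lower o))
    (fun o => by
      show 0 < PySem.Str.len (PySem.Str.lower o) ↔ (!o.toList.isEmpty) = true
      rw [hlen o]
      cases h : o.toList with
      | nil => simp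
      | cons c cs => simp)
    (fun o => by
      show 0 ≤ PySem.Str.len (PySem.Str.lower o)
      rw [hlen o]
      exact Int.natCast_nonneg _)
    (l.map Prod.fst) none

-- ===== VERDICT (by name: the statement is the Claim_ definition above) =====
theorem find_best_object_spec : Claim_equal_find_best_object := by
  intro query obj_summ _
  show find_best_object query obj_summ = find_best_object_alt query obj_summ
  show (obj_summ.foldl
      (fun st p =>
        if PySem.Str.isIn (PySem.Str.lower p.1) (PySem.Str.lower query) && decide (PySem.Str.len (PySem.Str.lower p.1) > st.2)
        then (some p.1, PySem.Str.len (PySem.Str.lower p.1))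
        else st)
      ((none : Option String), (0 : Int))).1
    = pvScan (PySem.Str.lower query)
        (PySem.List.sorted (obj_summ.map Prod.fst) (fun o => PySem.Str.len (PySem.Str.lower o)) true)
  exact pv_main (PySem.Str.lower query) obj_summ
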